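-- pv_equiv track=rewrite | github.com/vhsw/Advent-of-Code | 2019/Day 24/planet_of_discord.py | biodiversity
-- ===== SOURCE A (Python) =====
-- from typing import NamedTuple, Iterator
--
-- class Vec(NamedTuple):
--     """2D Vec"""
--
--     line: int
--     col: int
--
--     def __add__(self, other):
--         return Vec(self.line + other.line, self.col + other.col)
--
-- def biodiversity(grid, ml, mc):
--     bd = 0
--     for line in range(ml):
--         for col in range(mc):
--             point = Vec(line, col)
--             if point in grid:
--                 bd += pow(2, line * ml + col)
--     return bd
-- ===== SOURCE B (Python) =====
-- def biodiversity(grid, ml, mc):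
--     return sum(
--         pow(2, line * ml + col)
--         for (line, col) in set(grid)
--         if 0 <= line < ml and 0 <= col < mc
--     )
-- ===== Notes on version B (the rewrite author's own statement) =====
-- stated objective: alternative
-- what changed: Instead of scanning every window cell and testing membership in grid, B iterates once over the distinct points of grid and adds 2^(line*ml+col) for those inside the window.
import Mathlib
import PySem

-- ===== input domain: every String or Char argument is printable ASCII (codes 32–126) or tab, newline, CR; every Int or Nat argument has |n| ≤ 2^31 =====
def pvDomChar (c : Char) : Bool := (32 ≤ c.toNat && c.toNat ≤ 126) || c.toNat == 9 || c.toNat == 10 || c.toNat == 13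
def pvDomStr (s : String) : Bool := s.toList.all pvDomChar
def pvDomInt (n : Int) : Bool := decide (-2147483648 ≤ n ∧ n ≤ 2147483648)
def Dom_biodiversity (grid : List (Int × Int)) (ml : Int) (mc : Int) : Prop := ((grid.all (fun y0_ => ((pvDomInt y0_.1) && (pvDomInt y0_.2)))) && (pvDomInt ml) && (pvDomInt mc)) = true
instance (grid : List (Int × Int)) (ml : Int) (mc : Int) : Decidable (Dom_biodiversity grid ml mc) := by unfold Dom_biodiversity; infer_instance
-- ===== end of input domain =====

-- B replaces A's full-window scan with one pass over the distinct grid points (bounds-checked); objective: alternative.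


-- ===== PORT A =====
-- pow(2, line*ml+col): inside the loops 0 ≤ line < ml and 0 ≤ col, so the exponent is
-- nonnegative and '.toNat' is exact there.
def biodiversity (grid : List (Int × Int)) (ml : Int) (mc : Int) : Int :=
  (PySem.List.pyRange 0 ml 1).foldl (fun bd line =>
    (PySem.List.pyRange 0 mc 1).foldl (fun bd col =>
      if (line, col) ∈ grid then bd + 2 ^ (line * ml + col).toNat else bd) bd) 0

-- ===== PORT B =====
-- sum( pow(2, l*ml+c) for (l,c) in set(grid) if 0<=l<ml and 0<=c<mc ); set(grid) iterated
-- as the ordered distinct elements (the sum does not depend on the iteration order).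
def biodiversity_alt (grid : List (Int × Int)) (ml : Int) (mc : Int) : Int :=
  (((PySem.List.dedup grid).filter
      (fun p => decide (0 ≤ p.1 ∧ p.1 < ml ∧ 0 ≤ p.2 ∧ p.2 < mc))).map
    (fun p => (2 : Int) ^ (p.1 * ml + p.2).toNat)).sum

-- ===== PRECONDITION & SPEC =====
def Spec_biodiversity (grid : List (Int × Int)) (ml : Int) (mc : Int) (out : Int) : Prop := out = biodiversity_alt grid ml mc
instance (grid : List (Int × Int)) (ml : Int) (mc : Int) (out : Int) : Decidable (Spec_biodiversity grid ml mc out) := by unfold Spec_biodiversity; infer_instance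

-- ===== CLAIM (what is proved, stated in full; the proofs are below) =====
def Claim_equal_biodiversity : Prop := ∀ (grid : List (Int × Int)) (ml : Int) (mc : Int), Dom_biodiversity grid ml mc → Spec_biodiversity grid ml mc (biodiversity grid ml mc)

-- ===== LEMMAS AND PROOFS =====

lemma sum_map_flatMap {α β : Type} (l : List α) (f : α → List β) (g : β → Int) :
    ((l.flatMap f).map g).sum = (l.map (fun x => ((f x).map g).sum)).sum := by
  induction l with
  | nil => simp
  | cons a t ih => simp [ih]

-- The list of window cells that A finds in `grid`, in A's traversal order.
def pvCellsA (grid : List (Int × Int)) (ml : Int) (mc : Int) : List (Int × Int) :=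
  (PySem.List.pyRange 0 ml 1).flatMap (fun l =>
    ((PySem.List.pyRange 0 mc 1).filter (fun c => decide ((l, c) ∈ grid))).map (fun c => (l, c)))

-- B's list of points.
def pvCellsB (grid : List (Int × Int)) (ml : Int) (mc : Int) : List (Int × Int) :=
  (PySem.List.dedup grid).filter (fun p => decide (0 ≤ p.1 ∧ p.1 < ml ∧ 0 ≤ p.2 ∧ p.2 < mc))

lemma biodiversity_eq_sum (grid : List (Int × Int)) (ml mc : Int) :
    biodiversity grid ml mc
      = ((pvCellsA grid ml mc).map (fun p => (2 : Int) ^ (p.1 * ml + p.2).toNat)).sum := by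
  unfold biodiversity pvCellsA
  have hinner : ∀ (line : Int) (bd : Int),
      (PySem.List.pyRange 0 mc 1).foldl (fun bd col =>
        if (line, col) ∈ grid then bd + 2 ^ (line * ml + col).toNat else bd) bd
      = bd + (((PySem.List.pyRange 0 mc 1).filter
            (fun c => decide ((line, c) ∈ grid))).map
          (fun c => (2 : Int) ^ (line * ml + c).toNat)).sum := by
    intro line bd
    rw [PySem.List.foldl_ite_eq_foldl_filter, PySem.List.foldl_add]
  simp only [hinner]
  rw [PySem.List.foldl_add, sum_map_flatMap]
  simp [Function.comp_def]

lemma mem_pvCellsA (grid : List (Int × Int)) (ml mc : Int) (p : Int × Int) :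
    p ∈ pvCellsA grid ml mc ↔
      p ∈ grid ∧ 0 ≤ p.1 ∧ p.1 < ml ∧ 0 ≤ p.2 ∧ p.2 < mc := by
  unfold pvCellsA
  simp only [List.mem_flatMap, List.mem_map, List.mem_filter, PySem.List.mem_pyRange_one,
    decide_eq_true_eq]
  constructor
  · rintro ⟨l, ⟨hl0, hl1⟩, c, ⟨⟨hc0, hc1⟩, hm⟩, rfl⟩
    exact ⟨hm, hl0, hl1, hc0, hc1⟩
  · rintro ⟨hm, h1, h2, h3, h4⟩
    exact ⟨p.1, ⟨h1, h2⟩, p.2, ⟨⟨h3, h4⟩, by simpa using hm⟩, rfl⟩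

lemma nodup_pvCellsA (grid : List (Int × Int)) (ml mc : Int) :
    (pvCellsA grid ml mc).Nodup := by
  unfold pvCellsA
  rw [List.nodup_flatMap]
  constructor
  · intro l _
    exact (((PySem.List.nodup_pyRange_one 0 mc).filter _).map
      (fun a b h => congrArg Prod.snd h))
  · refine (PySem.List.nodup_pyRange_one 0 ml).imp ?_
    intro a b hab
    refine List.disjoint_left.2 ?_
    intro p hpa hpb
    simp only [List.mem_map, List.mem_filter] at hpa hpb
    obtain ⟨c, _, rfl⟩ := hpa
    obtain ⟨c', _, h⟩ := hpb
    exact hab (by simpa using congrArg Prod.fst h.symm)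

lemma mem_pvCellsB (grid : List (Int × Int)) (ml mc : Int) (p : Int × Int) :
    p ∈ pvCellsB grid ml mc ↔
      p ∈ grid ∧ 0 ≤ p.1 ∧ p.1 < ml ∧ 0 ≤ p.2 ∧ p.2 < mc := by
  unfold pvCellsB
  simp [List.mem_filter]

lemma nodup_pvCellsB (grid : List (Int × Int)) (ml mc : Int) :
    (pvCellsB grid ml mc).Nodup :=
  (PySem.List.nodup_dedup grid).filter _

lemma pvCellsA_perm_pvCellsB (grid : List (Int × Int)) (ml mc : Int) :
    (pvCellsA grid ml mc).Perm (pvCellsB grid ml mc) := by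
  apply List.perm_of_nodup_nodup_toFinset_eq (nodup_pvCellsA grid ml mc)
    (nodup_pvCellsB grid ml mc)
  ext p
  simp only [List.mem_toFinset, mem_pvCellsA, mem_pvCellsB]

-- ===== VERDICT (by name: the statement is the Claim_ definition above) =====
theorem biodiversity_spec : Claim_equal_biodiversity := by
  intro grid ml mc _
  unfold Spec_biodiversity
  rw [biodiversity_eq_sum]
  exact (((pvCellsA_perm_pvCellsB grid ml mc).map _).sum_eq)
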